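-- pv_equiv track=rewrite | github.com/TheeUnderdog/aap-data-agent-poc | scripts/run-notebook.py | convert_jupytext_to_fabric
-- ===== SOURCE A (Python) =====
-- def convert_jupytext_to_fabric(source: str, workspace_id: str, lakehouse_id: str, lakehouse_name: str) -> str:
--     """
--     Convert a Jupytext-style .py notebook (# %% markers) into Fabric's
--     fabricGitSource format (# CELL / # MARKDOWN / # METADATA blocks).
--     """
--     lines = source.splitlines()
--
--     # Build the Fabric notebook header with lakehouse metadata
--     header = [
--         "# Fabric notebook source",
--         "",
--         "# METADATA ********************",
--         "# META {",
--         '# META   "kernel_info": {',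
--         '# META     "name": "synapse_pyspark"',
--         "# META   },",
--         '# META   "dependencies": {',
--         '# META     "lakehouse": {',
--         f'# META       "default_lakehouse": "{lakehouse_id}",',
--         f'# META       "default_lakehouse_name": "{lakehouse_name}",',
--         f'# META       "default_lakehouse_workspace_id": "{workspace_id}",',
--         '# META       "known_lakehouses": [',
--         "# META         {",
--         f'# META           "id": "{lakehouse_id}"',
--         "# META         }",
--         "# META       ]",
--         "# META     }",
--         "# META   }",
--         "# META }",
--     ]
--
--     # Parse cells from Jupytext format
--     cells = []
--     current_cell = None
--
--     for line in lines:
--         if line.strip() == "# %% [markdown]":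
--             if current_cell is not None:
--                 cells.append(current_cell)
--             current_cell = {"type": "markdown", "lines": []}
--         elif line.strip() == "# %%":
--             if current_cell is not None:
--                 cells.append(current_cell)
--             current_cell = {"type": "code", "lines": []}
--         elif current_cell is not None:
--             if current_cell["type"] == "markdown":
--                 # Markdown lines are prefixed with "# "
--                 if line.startswith("# "):
--                     current_cell["lines"].append(line[2:])
--                 elif line.strip() == "#":
--                     current_cell["lines"].append("")
--                 else:
--                     current_cell["lines"].append(line)
--             else:
--                 current_cell["lines"].append(line)
--
--     if current_cell is not None:
--         cells.append(current_cell)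
--
--     # Build Fabric notebook content
--     output_lines = list(header)
--
--     for cell in cells:
--         # Strip trailing blank lines from cell content
--         cell_lines = cell["lines"]
--         while cell_lines and cell_lines[-1].strip() == "":
--             cell_lines = cell_lines[:-1]
--         if not cell_lines:
--             continue
--
--         output_lines.append("")
--
--         if cell["type"] == "markdown":
--             output_lines.append("# MARKDOWN ********************")
--             output_lines.append("")
--             for cl in cell_lines:
--                 if cl:
--                     output_lines.append(f"# {cl}")
--                 else:
--                     output_lines.append("#")
--         else:
--             output_lines.append("# CELL ********************")
--             output_lines.append("")
--             output_lines.extend(cell_lines)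
--
--         # Add cell metadata
--         output_lines.append("")
--         output_lines.append("# METADATA ********************")
--         output_lines.append("")
--         output_lines.append("# META {")
--         output_lines.append('# META   "language": "python",')
--         output_lines.append('# META   "language_group": "synapse_pyspark"')
--         output_lines.append("# META }")
--
--     output_lines.append("")
--     return "\n".join(output_lines)
-- ===== SOURCE B (Python) =====
-- def convert_jupytext_to_fabric(source: str, workspace_id: str, lakehouse_id: str, lakehouse_name: str) -> str:
--     """
--     Recursive segmentation: skip the preamble before the first `# %%` marker,
--     then recursively split the remaining lines at marker boundaries and render
--     each segment with a pure function -- no running cell state, no second pass.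
--     """
--     header = [
--         "# Fabric notebook source",
--         "",
--         "# METADATA ********************",
--         "# META {",
--         '# META   "kernel_info": {',
--         '# META     "name": "synapse_pyspark"',
--         "# META   },",
--         '# META   "dependencies": {',
--         '# META     "lakehouse": {',
--         f'# META       "default_lakehouse": "{lakehouse_id}",',
--         f'# META       "default_lakehouse_name": "{lakehouse_name}",',
--         f'# META       "default_lakehouse_workspace_id": "{workspace_id}",',
--         '# META       "known_lakehouses": [',
--         "# META         {",
--         f'# META           "id": "{lakehouse_id}"',
--         "# META         }",
--         "# META       ]",
--         "# META     }",
--         "# META   }",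
--         "# META }",
--     ]
--     cell_meta = [
--         "",
--         "# METADATA ********************",
--         "",
--         "# META {",
--         '# META   "language": "python",',
--         '# META   "language_group": "synapse_pyspark"',
--         "# META }",
--     ]
--
--     def is_marker(l):
--         return l.strip() in ("# %%", "# %% [markdown]")
--
--     def md_line(l):
--         if l.startswith("# "):
--             return l[2:]
--         if l.strip() == "#":
--             return ""
--         return l
--
--     def render(kind, raw):
--         body = [md_line(l) for l in raw] if kind == "markdown" else list(raw)
--         while body and body[-1].strip() == "":
--             body.pop()
--         if not body:
--             return []
--         if kind == "markdown":
--             return (["", "# MARKDOWN ********************", ""]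
--                     + [("# " + cl if cl else "#") for cl in body]
--                     + cell_meta)
--         return ["", "# CELL ********************", ""] + body + cell_meta
--
--     def go(lines):
--         # lines is empty or starts with a marker line
--         if not lines:
--             return []
--         kind = "markdown" if lines[0].strip() == "# %% [markdown]" else "code"
--         i = 1
--         while i < len(lines) and not is_marker(lines[i]):
--             i += 1
--         return render(kind, lines[1:i]) + go(lines[i:])
--
--     lines = source.splitlines()
--     j = 0
--     while j < len(lines) and not is_marker(lines[j]):
--         j += 1
--     return "\n".join(header + go(lines[j:]) + [""])
-- ===== Notes on version B (the rewrite author's own statement) =====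
-- stated objective: alternative
-- what changed: Replaces A's iterative two-phase design (a state-machine pass that accumulates a current cell into a list of dicts, then a second formatting loop) with recursive marker-boundary segmentation: skip the preamble, then recursively split the line list at each `# %%` marker and render every segment with a pure function, with no running cell state and no intermediate cell list.
import Mathlib
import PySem

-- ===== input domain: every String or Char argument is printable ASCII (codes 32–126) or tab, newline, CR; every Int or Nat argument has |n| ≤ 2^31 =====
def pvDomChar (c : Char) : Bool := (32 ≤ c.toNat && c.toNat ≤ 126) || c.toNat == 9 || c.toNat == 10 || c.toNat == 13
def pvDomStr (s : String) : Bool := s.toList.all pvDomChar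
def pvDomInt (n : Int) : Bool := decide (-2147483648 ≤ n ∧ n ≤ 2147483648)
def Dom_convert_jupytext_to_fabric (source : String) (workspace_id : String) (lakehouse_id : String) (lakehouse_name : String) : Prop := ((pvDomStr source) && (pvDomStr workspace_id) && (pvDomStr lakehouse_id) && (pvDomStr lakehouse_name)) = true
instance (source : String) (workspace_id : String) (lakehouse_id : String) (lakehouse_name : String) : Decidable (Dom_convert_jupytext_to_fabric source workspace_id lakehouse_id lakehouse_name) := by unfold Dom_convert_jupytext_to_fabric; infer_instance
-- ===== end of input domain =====

-- B replaces A's iterative two-phase design (state-machine pass building a cell list,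
-- then a formatting loop) with recursive marker-boundary segmentation: skip the
-- preamble, then recursively split the line list at each marker and render each
-- segment with a pure function (alternative decomposition, same cost).

-- Literals both Pythons contain verbatim: the file header and the per-cell metadata.
def pvHeader (workspace_id lakehouse_id lakehouse_name : String) : List String :=
  [ "# Fabric notebook source",
    "",
    "# METADATA ********************",
    "# META {",
    "# META   \"kernel_info\": {",
    "# META     \"name\": \"synapse_pyspark\"",
    "# META   },",
    "# META   \"dependencies\": {",
    "# META     \"lakehouse\": {",
    "# META       \"default_lakehouse\": \"" ++ lakehouse_id ++ "\",",
    "# META       \"default_lakehouse_name\": \"" ++ lakehouse_name ++ "\",",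
    "# META       \"default_lakehouse_workspace_id\": \"" ++ workspace_id ++ "\",",
    "# META       \"known_lakehouses\": [",
    "# META         {",
    "# META           \"id\": \"" ++ lakehouse_id ++ "\"",
    "# META         }",
    "# META       ]",
    "# META     }",
    "# META   }",
    "# META }" ]

def pvCellMeta : List String :=
  [ "",
    "# METADATA ********************",
    "",
    "# META {",
    "# META   \"language\": \"python\",",
    "# META   \"language_group\": \"synapse_pyspark\"",
    "# META }" ]

-- while body and body[-1].strip() == "": drop the last line (identical in A and B)
def pvRstripBlanks (ls : List String) : List String :=
  match h : ls.getLast? with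
  | none => ls
  | some x =>
      if PySem.Str.strip x = "" then
        pvRstripBlanks ls.dropLast
      else ls
termination_by ls.length
decreasing_by
  cases ls with
  | nil => simp at h
  | cons a t => simp [List.length_dropLast]

-- markdown line normalisation (identical in A's collection and B's md_line)
def pvMdLine (line : String) : String :=
  if PySem.Str.startswith line "# " then PySem.Str.slice line (some 2) none
  else if PySem.Str.strip line = "#" then ""
  else line

-- ===== PORT A =====
-- phase 1: the state-machine step over (cells so far, current cell)
def pvParseStep (st : List (String × List String) × Option (String × List String))
    (line : String) : List (String × List String) × Option (String × List String) :=
  if PySem.Str.strip line = "# %% [markdown]" then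
    (st.1 ++ st.2.toList, some ("markdown", []))
  else if PySem.Str.strip line = "# %%" then
    (st.1 ++ st.2.toList, some ("code", []))
  else
    match st.2 with
    | none => st
    | some c =>
        if c.1 = "markdown" then (st.1, some (c.1, c.2 ++ [pvMdLine line]))
        else (st.1, some (c.1, c.2 ++ [line]))

-- phase 2: the per-cell body of A's formatting loop, as sequential appends to output_lines
def pvRenderCellA (acc : List String) (cell : String × List String) : List String :=
  let cellLines := pvRstripBlanks cell.2
  if cellLines = [] then acc
  else
    let acc := acc ++ [""]
    let acc :=
      if cell.1 = "markdown" then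
        let acc := acc ++ ["# MARKDOWN ********************"]
        let acc := acc ++ [""]
        acc ++ cellLines.map (fun cl => if cl ≠ "" then "# " ++ cl else "#")
      else
        let acc := acc ++ ["# CELL ********************"]
        let acc := acc ++ [""]
        acc ++ cellLines
    acc ++ pvCellMeta

def convert_jupytext_to_fabric (source : String) (workspace_id : String) (lakehouse_id : String) (lakehouse_name : String) : String :=
  let lines := PySem.Str.splitlines source
  let header := pvHeader workspace_id lakehouse_id lakehouse_name
  let st := lines.foldl pvParseStep ([], none)
  let cells := st.1 ++ st.2.toList
  let output_lines := cells.foldl pvRenderCellA header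
  PySem.Str.join "\n" (output_lines ++ [""])

-- ===== PORT B =====
def pvIsMarker (l : String) : Bool :=
  PySem.Str.strip l = "# %%" || PySem.Str.strip l = "# %% [markdown]"

-- render(kind, raw): normalise markdown lines, trim trailing blanks, emit the block
def pvRender (kind : String) (raw : List String) : List String :=
  let body := pvRstripBlanks (if kind = "markdown" then raw.map pvMdLine else raw)
  if body = [] then []
  else if kind = "markdown" then
    ["", "# MARKDOWN ********************", ""]
      ++ body.map (fun cl => if cl ≠ "" then "# " ++ cl else "#")
      ++ pvCellMeta
  else
    ["", "# CELL ********************", ""] ++ body ++ pvCellMeta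

-- go(lines): lines is empty or starts with a marker; render the first segment, recurse
def pvGo (lines : List String) : List String :=
  match lines with
  | [] => []
  | l :: t =>
      let kind := if PySem.Str.strip l = "# %% [markdown]" then "markdown" else "code"
      pvRender kind (t.takeWhile (fun x => !pvIsMarker x))
        ++ pvGo (t.dropWhile (fun x => !pvIsMarker x))
termination_by lines.length
decreasing_by
  have := List.length_dropWhile_le (fun x => !pvIsMarker x) t
  simp only [List.length_cons]; omega

def convert_jupytext_to_fabric_alt (source : String) (workspace_id : String) (lakehouse_id : String) (lakehouse_name : String) : String :=
  let lines := PySem.Str.splitlines source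
  PySem.Str.join "\n"
    (pvHeader workspace_id lakehouse_id lakehouse_name
      ++ pvGo (lines.dropWhile (fun x => !pvIsMarker x))
      ++ [""])

-- ===== PRECONDITION & SPEC =====
def Spec_convert_jupytext_to_fabric (source : String) (workspace_id : String) (lakehouse_id : String) (lakehouse_name : String) (out : String) : Prop := out = convert_jupytext_to_fabric_alt source workspace_id lakehouse_id lakehouse_name
instance (source : String) (workspace_id : String) (lakehouse_id : String) (lakehouse_name : String) (out : String) : Decidable (Spec_convert_jupytext_to_fabric source workspace_id lakehouse_id lakehouse_name out) := by unfold Spec_convert_jupytext_to_fabric; infer_instance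

-- ===== CLAIM =====
def Claim_equal_convert_jupytext_to_fabric : Prop := ∀ (source : String) (workspace_id : String) (lakehouse_id : String) (lakehouse_name : String), Dom_convert_jupytext_to_fabric source workspace_id lakehouse_id lakehouse_name → Spec_convert_jupytext_to_fabric source workspace_id lakehouse_id lakehouse_name (convert_jupytext_to_fabric source workspace_id lakehouse_id lakehouse_name)

-- ===== LEMMAS AND PROOFS =====

-- the lines A's parse loop stores for a cell of kind k, from the raw segment lines
def pvCollect (k : String) (ls : List String) : List String :=
  if k = "markdown" then ls.map pvMdLine else ls

-- the block a finished cell contributes to the output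
def pvBlockA (c : String × List String) : List String :=
  let body := pvRstripBlanks c.2
  if body = [] then []
  else if c.1 = "markdown" then
    ["", "# MARKDOWN ********************", ""]
      ++ body.map (fun cl => if cl ≠ "" then "# " ++ cl else "#")
      ++ pvCellMeta
  else
    ["", "# CELL ********************", ""] ++ body ++ pvCellMeta

theorem renderA_eq_blockA (acc : List String) (c : String × List String) :
    pvRenderCellA acc c = acc ++ pvBlockA c := by
  unfold pvRenderCellA pvBlockA
  by_cases hb : pvRstripBlanks c.2 = [] <;> by_cases hm : c.1 = "markdown" <;>
    simp [hb, hm]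

theorem foldl_renderA (cells : List (String × List String)) (init : List String) :
    cells.foldl pvRenderCellA init = init ++ cells.flatMap pvBlockA := by
  induction cells generalizing init with
  | nil => simp
  | cons c t ih => simp [List.foldl_cons, renderA_eq_blockA, ih, List.append_assoc]

theorem render_eq_blockA (k : String) (raw : List String) :
    pvRender k raw = pvBlockA (k, pvCollect k raw) := by
  unfold pvRender pvBlockA pvCollect
  by_cases hm : k = "markdown" <;> simp [hm]

-- with an open cell (k, b), the parse loop over `lines` finishes that cell with the
-- lines collected up to the next marker, and continues like B's `go` afterwards

theorem parse_inv (lines : List String) (cells : List (String × List String))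
    (k : String) (b : List String) :
    (((lines.foldl pvParseStep (cells, some (k, b))).1
        ++ (lines.foldl pvParseStep (cells, some (k, b))).2.toList).flatMap pvBlockA)
      = cells.flatMap pvBlockA
        ++ pvBlockA (k, b ++ pvCollect k (lines.takeWhile (fun x => !pvIsMarker x)))
        ++ pvGo (lines.dropWhile (fun x => !pvIsMarker x)) := by
  induction lines generalizing cells k b with
  | nil => simp [pvCollect, pvGo]
  | cons l t ih =>
      by_cases h1 : PySem.Str.strip l = "# %% [markdown]"
      · have hmk : pvIsMarker l = true := by simp [pvIsMarker, h1]
        simp only [List.foldl_cons,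
          show pvParseStep (cells, some (k, b)) l
              = (cells ++ [(k, b)], some ("markdown", [])) by simp [pvParseStep, h1],
          List.takeWhile_cons, List.dropWhile_cons, hmk, Bool.not_true,
          Bool.false_eq_true, if_false, ih]
        rw [show pvGo (l :: t)
              = pvRender "markdown" (t.takeWhile (fun x => !pvIsMarker x))
                  ++ pvGo (t.dropWhile (fun x => !pvIsMarker x)) by
            simp [pvGo, h1]]
        simp [pvCollect, render_eq_blockA, List.append_assoc]
      · by_cases h2 : PySem.Str.strip l = "# %%"
        · have hmk : pvIsMarker l = true := by simp [pvIsMarker, h2]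
          simp only [List.foldl_cons,
            show pvParseStep (cells, some (k, b)) l
                = (cells ++ [(k, b)], some ("code", [])) by simp [pvParseStep, h2],
            List.takeWhile_cons, List.dropWhile_cons, hmk, Bool.not_true,
            Bool.false_eq_true, if_false, ih]
          rw [show pvGo (l :: t)
                = pvRender "code" (t.takeWhile (fun x => !pvIsMarker x))
                    ++ pvGo (t.dropWhile (fun x => !pvIsMarker x)) by
              simp [pvGo, h2]]
          simp [pvCollect, render_eq_blockA, List.append_assoc]
        · have hmk : pvIsMarker l = false := by simp [pvIsMarker, h1, h2]
          by_cases h3 : k = "markdown"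
          · simp only [List.foldl_cons,
              show pvParseStep (cells, some (k, b)) l
                  = (cells, some (k, b ++ [pvMdLine l])) by simp [pvParseStep, h1, h2, h3],
              List.takeWhile_cons, List.dropWhile_cons, hmk, Bool.not_false, if_true, ih]
            simp [pvCollect, h3, List.append_assoc]
          · simp only [List.foldl_cons,
              show pvParseStep (cells, some (k, b)) l
                  = (cells, some (k, b ++ [l])) by simp [pvParseStep, h1, h2, h3],
              List.takeWhile_cons, List.dropWhile_cons, hmk, Bool.not_false, if_true, ih]
            simp [pvCollect, h3, List.append_assoc]

-- from the closed initial state: A's rendered cells equal B's recursive segmentation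
theorem parse_closed (lines : List String) :
    (((lines.foldl pvParseStep ([], none)).1
        ++ (lines.foldl pvParseStep ([], none)).2.toList).flatMap pvBlockA)
      = pvGo (lines.dropWhile (fun x => !pvIsMarker x)) := by
  induction lines with
  | nil => simp [pvGo]
  | cons l t ih =>
      by_cases h1 : PySem.Str.strip l = "# %% [markdown]"
      · have hmk : pvIsMarker l = true := by simp [pvIsMarker, h1]
        simp only [List.foldl_cons,
          show pvParseStep ([], none) l = ([], some ("markdown", [])) by
            simp [pvParseStep, h1],
          List.dropWhile_cons, hmk, Bool.not_true, Bool.false_eq_true, if_false]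
        rw [parse_inv]
        rw [show pvGo (l :: t)
              = pvRender "markdown" (t.takeWhile (fun x => !pvIsMarker x))
                  ++ pvGo (t.dropWhile (fun x => !pvIsMarker x)) by
            simp [pvGo, h1]]
        simp [render_eq_blockA, pvCollect]
      · by_cases h2 : PySem.Str.strip l = "# %%"
        · have hmk : pvIsMarker l = true := by simp [pvIsMarker, h2]
          simp only [List.foldl_cons,
            show pvParseStep ([], none) l = ([], some ("code", [])) by
              simp [pvParseStep, h2],
            List.dropWhile_cons, hmk, Bool.not_true, Bool.false_eq_true, if_false]
          rw [parse_inv]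
          rw [show pvGo (l :: t)
                = pvRender "code" (t.takeWhile (fun x => !pvIsMarker x))
                    ++ pvGo (t.dropWhile (fun x => !pvIsMarker x)) by
              simp [pvGo, h2]]
          simp [render_eq_blockA, pvCollect]
        · have hmk : pvIsMarker l = false := by simp [pvIsMarker, h1, h2]
          simp only [List.foldl_cons,
            show pvParseStep ([], none) l = ([], none) by simp [pvParseStep, h1, h2],
            List.dropWhile_cons, hmk, Bool.not_false, if_true, ih]

-- ===== VERDICT =====
theorem convert_jupytext_to_fabric_spec : Claim_equal_convert_jupytext_to_fabric := by
  intro source workspace_id lakehouse_id lakehouse_name _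
  unfold Spec_convert_jupytext_to_fabric convert_jupytext_to_fabric convert_jupytext_to_fabric_alt
  simp only [foldl_renderA, parse_closed, List.append_assoc]
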